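-- pv_equiv track=rewrite | github.com/josepitself/crackppt | cracker.py | generate_strings_with_separators
-- ===== SOURCE A (Python) =====
-- def generate_strings_with_separators(matrix, separators):
--     """
--     Generate a list of strings where each string is formed by concatenating the words
--     in each row of the matrix with all possible combinations of the given separators.
--     Each pair of words can only be separated by one separator, but different separators
--     can be used within the same string.
--     """
--     def all_combinations(words, sep):
--         """Helper function to recursively find all combinations for a given list of words."""
--         if len(words) == 1:
--             return words
--         # Recur for the rest of the words
--         rest_combinations = all_combinations(words[1:], sep)
--         result = []
--         # For each combination and separator, prepend the first word and separator to the combination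
--         for combination in rest_combinations:
--             for s in sep:
--                 result.append(words[0] + s + combination)
--         return result
--
--     result_list = []
--     # Generate combinations for each row in the matrix
--     for row in matrix:
--         result_list.extend(all_combinations(row, separators))
--
--     return result_list
-- ===== SOURCE B (Python) =====
-- def generate_strings_with_separators(matrix, separators):
--     """Index-arithmetic enumeration: for each row with g gaps there are m**g
--     outputs; decode each counter value i in base m (least-significant digit =
--     first gap) to pick the separator for every gap, instead of A's recursion."""
--     result_list = []
--     m = len(separators)
--     for row in matrix:
--         total = m ** (len(row) - 1)
--         for i in range(total):
--             s = row[0]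
--             k = i
--             for j in range(1, len(row)):
--                 s = s + separators[k % m] + row[j]
--                 k //= m
--             result_list.append(s)
--     return result_list
-- ===== Notes on version B (the rewrite author's own statement) =====
-- stated objective: alternative
-- what changed: Replaces the per-row recursive combination builder with direct index arithmetic: each of the m**gaps outputs is produced by decoding a counter in base m (least-significant digit picks the first gap's separator) and joining words left to right.
import Mathlib
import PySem

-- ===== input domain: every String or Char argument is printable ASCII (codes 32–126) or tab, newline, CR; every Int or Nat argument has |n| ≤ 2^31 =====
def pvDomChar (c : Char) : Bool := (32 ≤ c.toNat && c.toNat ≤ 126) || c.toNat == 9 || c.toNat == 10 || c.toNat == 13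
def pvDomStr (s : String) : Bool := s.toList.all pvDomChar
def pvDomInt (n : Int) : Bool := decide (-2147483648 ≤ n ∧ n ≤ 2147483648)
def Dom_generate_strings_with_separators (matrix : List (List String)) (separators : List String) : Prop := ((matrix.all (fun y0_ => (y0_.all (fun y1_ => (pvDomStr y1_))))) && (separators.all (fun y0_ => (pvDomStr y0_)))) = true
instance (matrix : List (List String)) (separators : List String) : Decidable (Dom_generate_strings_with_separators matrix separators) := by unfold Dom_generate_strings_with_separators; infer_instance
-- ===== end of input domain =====

-- B enumerates each row's m^gaps outputs by decoding a base-m counter instead of A's recursion; return values proved equal on matrices with no empty row.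

-- ===== PORT A =====
-- all_combinations(words, sep): recursion on the list; the [] case (where Python
-- recurses forever, RecursionError) is a totalising guard, excluded by Pre_.
def pvAllCombinations (words : List String) (sep : List String) : List String :=
  match words with
  | [] => []
  | [w] => [w]
  | w :: rest =>
      let rest_combinations := pvAllCombinations rest sep
      -- for combination in rest_combinations: for s in sep: result.append(...)
      rest_combinations.foldl
        (fun res combination =>
          sep.foldl (fun res s => res ++ [w ++ s ++ combination]) res) []

def generate_strings_with_separators (matrix : List (List String)) (separators : List String) : List String :=
  -- result_list = []; for row in matrix: result_list.extend(all_combinations(row, separators))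
  matrix.foldl (fun result_list row => result_list ++ pvAllCombinations row separators) []

-- ===== PORT B =====
-- for i in range(m ** (len(row)-1)): decode i in base m, joining left to right:
--   s = row[0]; k = i
--   for j in range(1, len(row)): s = s + separators[k % m] + row[j]; k //= m
-- (the [] row case, where Python raises on m ** -1 / range, is a totalising guard, excluded by Pre_;
--  separators.getD is exact: whenever the inner loop runs, k % m < m is a valid index)
def generate_strings_with_separators_alt (matrix : List (List String)) (separators : List String) : List String :=
  let m := separators.length
  matrix.foldl (fun result_list row =>
    match row with
    | [] => result_list
    | w :: ws =>
        result_list ++ (List.range (m ^ ws.length)).map (fun i =>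
          (ws.foldl (fun (sk : String × Nat) word =>
              (sk.1 ++ separators.getD (sk.2 % m) "" ++ word, sk.2 / m)) (w, i)).1)) []

-- ===== PRECONDITION & SPEC =====
-- Pre_ excludes matrices with an empty row: there A's recursion never terminates
-- (RecursionError) and B raises (m ** -1, a float, is no range argument).
def Pre_generate_strings_with_separators (matrix : List (List String)) (separators : List String) : Prop :=
  ∀ row ∈ matrix, row ≠ []
instance (matrix : List (List String)) (separators : List String) : Decidable (Pre_generate_strings_with_separators matrix separators) := by unfold Pre_generate_strings_with_separators; infer_instance
def pvWitness_generate_strings_with_separators : List (List String) × List String := ([["a", "b"], ["xy"]], ["-", "_"])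

def Spec_generate_strings_with_separators (matrix : List (List String)) (separators : List String) (out : List String) : Prop := out = generate_strings_with_separators_alt matrix separators
instance (matrix : List (List String)) (separators : List String) (out : List String) : Decidable (Spec_generate_strings_with_separators matrix separators out) := by unfold Spec_generate_strings_with_separators; infer_instance

-- ===== CLAIM =====
def Claim_equal_generate_strings_with_separators : Prop := ∀ (matrix : List (List String)) (separators : List String), Dom_generate_strings_with_separators matrix separators → Pre_generate_strings_with_separators matrix separators → Spec_generate_strings_with_separators matrix separators (generate_strings_with_separators matrix separators)

-- ===== LEMMAS AND PROOFS =====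

-- The suffix a counter value k contributes behind the first word.
def pvTail (sep : List String) (m : Nat) (ws : List String) (k : Nat) : String :=
  match ws with
  | [] => ""
  | x :: xs => sep.getD (k % m) "" ++ x ++ pvTail sep m xs (k / m)

-- B's inner fold accumulates a prefix in front of pvTail.
lemma pvFold_eq_tail (sep : List String) (m : Nat) (ws : List String) (p : String) (k : Nat) :
    (ws.foldl (fun (sk : String × Nat) word =>
        (sk.1 ++ sep.getD (sk.2 % m) "" ++ word, sk.2 / m)) (p, k)).1
      = p ++ pvTail sep m ws k := by
  induction ws generalizing p k with
  | nil => simp [pvTail]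
  | cons x xs ih =>
      simp only [List.foldl_cons]
      rw [ih]
      simp [pvTail, String.append_assoc]

-- A's nested append-loops are a flatMap of a map (combination-major, separator-minor).
lemma pvAllComb_cons (w r : String) (rs : List String) (sep : List String) :
    pvAllCombinations (w :: r :: rs) sep
      = (pvAllCombinations (r :: rs) sep).flatMap (fun c => sep.map (fun s => w ++ s ++ c)) := by
  show (pvAllCombinations (r :: rs) sep).foldl
        (fun res combination => sep.foldl (fun res s => res ++ [w ++ s ++ combination]) res) []
      = _
  generalize pvAllCombinations (r :: rs) sep = rc
  induction rc using List.reverseRecOn with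
  | nil => simp
  | append_singleton cs c ih =>
      rw [List.foldl_append, ih]
      simp only [List.foldl_cons, List.foldl_nil]
      rw [PySem.List.foldl_append_singleton_eq_map, List.flatMap_append]
      simp

-- range (t * m) enumerated combination-major, separator-minor.
lemma pvRange_mul (t m : Nat) :
    List.range (t * m) = (List.range t).flatMap (fun c => (List.range m).map (fun s => c * m + s)) := by
  induction t with
  | zero => simp
  | succ t ih =>
      rw [Nat.succ_mul, List.range_add, ih, List.range_succ, List.flatMap_append]
      simp

-- Reading a list off by valid indices is the list itself.
lemma pvMap_getD (l : List String) (f : String → String) :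
    (List.range l.length).map (fun j => f (l.getD j "")) = l.map f := by
  induction l with
  | nil => simp
  | cons x xs ih =>
      rw [List.length_cons, List.range_succ_eq_map, List.map_cons, List.map_map]
      simp only [List.getD_cons_zero, List.map_cons]
      rw [← ih]
      apply congrArg
      apply List.map_congr_left
      intro j _
      simp

-- Per nonempty row: A's recursion = B's base-m counter decoding.
lemma pvRow_eq (w : String) (ws sep : List String) :
    pvAllCombinations (w :: ws) sep
      = (List.range (sep.length ^ ws.length)).map (fun i => w ++ pvTail sep sep.length ws i) := by
  induction ws generalizing w with
  | nil => simp [pvAllCombinations, pvTail]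
  | cons r rs ih =>
      rw [pvAllComb_cons, ih r]
      rcases Nat.eq_zero_or_pos sep.length with hm | hm
      · rw [List.length_eq_zero_iff.mp hm]
        simp [pow_succ]
      · simp only [List.length_cons]
        rw [pow_succ, pvRange_mul, List.map_flatMap, List.flatMap_map]
        apply List.flatMap_congr
        intro c _
        rw [← pvMap_getD sep (fun s => w ++ s ++ (r ++ pvTail sep sep.length rs c)), List.map_map]
        apply List.map_congr_left
        intro s hs
        have hs' : s < sep.length := List.mem_range.mp hs
        simp [pvTail, Nat.mul_comm c sep.length, Nat.mod_eq_of_lt hs',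
          Nat.mul_add_div hm, Nat.div_eq_of_lt hs', String.append_assoc]

-- ===== VERDICT =====
theorem generate_strings_with_separators_spec : Claim_equal_generate_strings_with_separators := by
  intro matrix separators hdom hpre
  clear hdom
  unfold Spec_generate_strings_with_separators generate_strings_with_separators
    generate_strings_with_separators_alt
  induction matrix using List.reverseRecOn with
  | nil => rfl
  | append_singleton rows row ih =>
      rw [List.foldl_append, List.foldl_append,
          ih (fun r hr => hpre r (List.mem_append_left _ hr))]
      simp only [List.foldl_cons, List.foldl_nil]
      obtain ⟨w, ws, rfl⟩ := List.exists_cons_of_ne_nil (hpre row (by simp))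
      rw [pvRow_eq]
      apply congrArg
      apply List.map_congr_left
      intro i _
      exact (pvFold_eq_tail separators separators.length ws w i).symm
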